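-- pv_equiv track=rewrite | github.com/tetrixcorps/joromi | utils/audio_processor.py | merge_transcriptions
-- ===== SOURCE A (Python) =====
-- from typing import Dict, Any, Tuple, Optional, List
--
-- def merge_transcriptions(
--
--     transcriptions: List[str],
--     segment_info: List[Dict[str, Any]]
-- ) -> str:
--     """Merge transcriptions from segments with overlap handling"""
--     if not transcriptions:
--         return ""
--
--     if len(transcriptions) == 1:
--         return transcriptions[0]
--
--     merged = []
--     overlap_tokens = 5  # Number of tokens to check for overlap
--
--     for i in range(len(transcriptions)):
--         current_trans = transcriptions[i].split()
--
--         if i == 0: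
--             merged.extend(current_trans[:-overlap_tokens])
--         elif i == len(transcriptions) - 1:
--             merged.extend(current_trans)
--         else:
--             # Find best overlap point
--             next_trans = transcriptions[i + 1].split()
--             overlap_found = False
--
--             for j in range(len(current_trans) - overlap_tokens):
--                 overlap_segment = ' '.join(current_trans[j:j + overlap_tokens])
--                 if overlap_segment in ' '.join(next_trans):
--                     merged.extend(current_trans[:-overlap_tokens])
--                     overlap_found = True
--                     break
--
--             if not overlap_found:
--                 merged.extend(current_trans[:-overlap_tokens])
--
--     return ' '.join(merged)
-- ===== SOURCE B (Python) =====
-- def merge_transcriptions(transcriptions, segment_info):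
--     if not transcriptions:
--         return ""
--     if len(transcriptions) == 1:
--         return transcriptions[0]
--     # build the token list back-to-front: the last segment keeps all its
--     # tokens, each earlier segment prepends its tokens minus the final 5
--     merged = transcriptions[-1].split()
--     for text in reversed(transcriptions[:-1]):
--         merged = text.split()[:-5] + merged
--     return ' '.join(merged)
-- ===== Notes on version B (the rewrite author's own statement) =====
-- stated objective: alternative
-- what changed: B drops A's forward index loop with its nested overlap search (both the found and not-found branches extend merged with the same tokens[:-5], so the search never affects the output) and instead builds the token list back-to-front: it seeds with the last segment's full tokens and walks reversed(transcriptions[:-1]) prepending each segment's tokens[:-5].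
import Mathlib
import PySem

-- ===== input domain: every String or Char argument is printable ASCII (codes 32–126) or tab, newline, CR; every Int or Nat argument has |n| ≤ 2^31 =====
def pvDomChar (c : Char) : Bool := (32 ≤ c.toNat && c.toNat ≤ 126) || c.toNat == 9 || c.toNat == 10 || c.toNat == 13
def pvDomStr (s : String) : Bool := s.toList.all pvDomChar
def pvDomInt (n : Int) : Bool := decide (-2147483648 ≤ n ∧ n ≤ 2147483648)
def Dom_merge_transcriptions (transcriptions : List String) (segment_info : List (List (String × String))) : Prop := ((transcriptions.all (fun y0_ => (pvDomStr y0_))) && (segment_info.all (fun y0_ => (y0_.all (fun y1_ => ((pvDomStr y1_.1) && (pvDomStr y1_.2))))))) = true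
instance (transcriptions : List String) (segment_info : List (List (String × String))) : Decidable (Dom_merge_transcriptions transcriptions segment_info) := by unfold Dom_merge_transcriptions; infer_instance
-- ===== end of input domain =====

-- B replaces A's index loop with its dead nested overlap search (both branches extend
-- merged with the same tokens[:-5]) by a structural recursion on the segment list.

-- ===== PORT A =====
def merge_transcriptions (transcriptions : List String) (segment_info : List (List (String × String))) : String :=
  if transcriptions = [] then ""
  else if transcriptions.length = 1 then PySem.List.pyGetD transcriptions 0 ""
  else
    let merged : List String :=
      (PySem.List.pyRange 0 (transcriptions.length : Int) 1).foldl (fun merged i =>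
        let current_trans := PySem.Str.split₀ (PySem.List.pyGetD transcriptions i "")
        if i = 0 then
          merged ++ PySem.List.slice current_trans none (some (-5))
        else if i = (transcriptions.length : Int) - 1 then
          merged ++ current_trans
        else
          -- find best overlap point (break on first j that matches)
          let next_trans := PySem.Str.split₀ (PySem.List.pyGetD transcriptions (i + 1) "")
          let overlap_found :=
            (PySem.List.pyRange 0 ((current_trans.length : Int) - 5) 1).any (fun j =>
              PySem.Str.isIn (PySem.Str.join " " (PySem.List.slice current_trans (some j) (some (j + 5))))
                (PySem.Str.join " " next_trans))
          if overlap_found then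
            merged ++ PySem.List.slice current_trans none (some (-5))
          else
            merged ++ PySem.List.slice current_trans none (some (-5))) []
    PySem.Str.join " " merged

-- ===== PORT B =====
def merge_transcriptions_alt (transcriptions : List String) (segment_info : List (List (String × String))) : String :=
  if transcriptions = [] then ""
  else if transcriptions.length = 1 then PySem.List.pyGetD transcriptions 0 ""
  else
    -- back-to-front: seed with the last segment's tokens, then walk
    -- reversed(transcriptions[:-1]) prepending tokens[:-5]
    let merged0 := PySem.Str.split₀ (PySem.List.pyGetD transcriptions (-1) "")
    let merged := ((PySem.List.slice transcriptions none (some (-1))).reverse).foldl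
      (fun merged text => PySem.List.slice (PySem.Str.split₀ text) none (some (-5)) ++ merged) merged0
    PySem.Str.join " " merged

-- ===== PRECONDITION & SPEC =====
def Spec_merge_transcriptions (transcriptions : List String) (segment_info : List (List (String × String))) (out : String) : Prop := out = merge_transcriptions_alt transcriptions segment_info
instance (transcriptions : List String) (segment_info : List (List (String × String))) (out : String) : Decidable (Spec_merge_transcriptions transcriptions segment_info out) := by unfold Spec_merge_transcriptions; infer_instance

-- ===== CLAIM =====
def Claim_equal_merge_transcriptions : Prop := ∀ (transcriptions : List String) (segment_info : List (List (String × String))), Dom_merge_transcriptions transcriptions segment_info → Spec_merge_transcriptions transcriptions segment_info (merge_transcriptions transcriptions segment_info)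

-- ===== LEMMAS AND PROOFS =====

-- the per-index contribution of A's loop, after its dead overlap search is collapsed
def mtPiece (ts : List String) (k : Nat) : List String :=
  if (k : Int) = (ts.length : Int) - 1 then PySem.Str.split₀ (PySem.List.pyGetD ts (k : Int) "")
  else PySem.List.slice (PySem.Str.split₀ (PySem.List.pyGetD ts (k : Int) "")) none (some (-5))

theorem mtPiece_zero (t : String) (rest : List String) (hr : rest ≠ []) :
    mtPiece (t :: rest) 0 = PySem.List.slice (PySem.Str.split₀ t) none (some (-5)) := by
  have hlen : 1 ≤ rest.length := List.length_pos_iff.mpr hr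
  unfold mtPiece
  rw [if_neg (by simp; omega)]
  simp

theorem mtPiece_succ (t : String) (rest : List String) (k : Nat) :
    mtPiece (t :: rest) (k + 1) = mtPiece rest k := by
  unfold mtPiece
  have hc : (((k + 1 : Nat)) : Int) = (((t :: rest).length : Nat) : Int) - 1 ↔
      ((k : Nat) : Int) = ((rest.length : Nat) : Int) - 1 := by
    simp; omega
  have hg : PySem.List.pyGetD (t :: rest) ((k + 1 : Nat) : Int) "" =
      PySem.List.pyGetD rest ((k : Nat) : Int) "" := by
    rw [PySem.List.pyGetD_of_nonneg _ _ (by positivity),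
        PySem.List.pyGetD_of_nonneg _ _ (by positivity)]
    have h1 : (((k + 1 : Nat)) : Int).toNat = k + 1 := by omega
    have h2 : (((k : Nat)) : Int).toNat = k := by omega
    rw [h1, h2, List.getD_cons_succ]
  by_cases h : ((k : Nat) : Int) = ((rest.length : Nat) : Int) - 1
  · rw [if_pos (hc.mpr h), if_pos h, hg]
  · rw [if_neg (fun hx => h (hc.mp hx)), if_neg h, hg]

theorem foldr_prepend (l : List String) (g : String → List String) (init : List String) :
    l.foldr (fun t acc => g t ++ acc) init = l.flatMap g ++ init := by
  induction l with
  | nil => simp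
  | cons t rest ih => simp [ih]

theorem flatMap_mtPiece : ∀ (ts : List String) (h : ts ≠ []),
    (List.range ts.length).flatMap (mtPiece ts)
      = ts.dropLast.flatMap (fun t => PySem.List.slice (PySem.Str.split₀ t) none (some (-5)))
          ++ PySem.Str.split₀ (ts.getLast h) := by
  intro ts
  induction ts with
  | nil => intro h; exact absurd rfl h
  | cons t rest ih =>
    intro _
    by_cases hr : rest = []
    · subst hr
      simp [mtPiece]
    · rw [List.length_cons, List.range_succ_eq_map, List.flatMap_cons, List.flatMap_map,
        mtPiece_zero t rest hr,
        List.flatMap_congr (l := List.range rest.length)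
          (f := fun a => mtPiece (t :: rest) (a + 1)) (g := mtPiece rest)
          (fun k _ => mtPiece_succ t rest k),
        ih hr, List.dropLast_cons_of_ne_nil hr, List.flatMap_cons,
        List.getLast_cons hr, List.append_assoc]

theorem merge_transcriptions_eq (transcriptions : List String)
    (segment_info : List (List (String × String))) :
    merge_transcriptions transcriptions segment_info
      = merge_transcriptions_alt transcriptions segment_info := by
  unfold merge_transcriptions merge_transcriptions_alt
  by_cases he : transcriptions = []
  · simp [he]
  · simp only [he, if_false]
    by_cases h1 : transcriptions.length = 1
    · simp [h1]
    · simp only [h1, if_false]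
      congr 1
      have hlen : 2 ≤ transcriptions.length := by
        rcases transcriptions with _ | ⟨a, _ | _⟩ <;> simp_all
      have hcong :
          (PySem.List.pyRange 0 (transcriptions.length : Int) 1).foldl (fun merged i =>
            let current_trans := PySem.Str.split₀ (PySem.List.pyGetD transcriptions i "")
            if i = 0 then
              merged ++ PySem.List.slice current_trans none (some (-5))
            else if i = (transcriptions.length : Int) - 1 then
              merged ++ current_trans
            else
              let next_trans := PySem.Str.split₀ (PySem.List.pyGetD transcriptions (i + 1) "")
              let overlap_found :=
                (PySem.List.pyRange 0 ((current_trans.length : Int) - 5) 1).any (fun j =>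
                  PySem.Str.isIn (PySem.Str.join " " (PySem.List.slice current_trans (some j) (some (j + 5))))
                    (PySem.Str.join " " next_trans))
              if overlap_found then
                merged ++ PySem.List.slice current_trans none (some (-5))
              else
                merged ++ PySem.List.slice current_trans none (some (-5)))
            ([] : List String)
          = (PySem.List.pyRange 0 (transcriptions.length : Int) 1).foldl
              (fun merged i =>
                merged ++ (if i = (transcriptions.length : Int) - 1 then
                    PySem.Str.split₀ (PySem.List.pyGetD transcriptions i "")
                  else PySem.List.slice (PySem.Str.split₀ (PySem.List.pyGetD transcriptions i "")) none (some (-5))))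
              ([] : List String) := by
        apply PySem.List.foldl_congr_mem
        intro acc i hi
        rw [PySem.List.mem_pyRange_one] at hi
        simp only [ite_self]
        by_cases h0 : i = 0
        · have hne : i ≠ (transcriptions.length : Int) - 1 := by omega
          rw [if_pos h0, if_neg (h0 ▸ hne)]
        · by_cases hlast : i = (transcriptions.length : Int) - 1
          · rw [if_neg h0, if_pos hlast, if_pos hlast]
          · rw [if_neg h0, if_neg hlast, if_neg hlast]
      rw [hcong, PySem.List.foldl_append_eq_flatMap, List.nil_append, PySem.List.pyRange_one]
      rw [List.flatMap_map]
      simp only [Int.sub_zero, Int.toNat_natCast]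
      rw [List.flatMap_congr (l := List.range transcriptions.length)
            (g := mtPiece transcriptions)
            (fun k _ => by simp only [mtPiece, Int.zero_add]),
          flatMap_mtPiece transcriptions he]
      rw [List.foldl_reverse, PySem.List.slice_to_neg_one, foldr_prepend,
          PySem.List.pyGetD_neg_one transcriptions "" he]

-- ===== VERDICT =====
theorem merge_transcriptions_spec : Claim_equal_merge_transcriptions := by
  intro transcriptions segment_info _
  unfold Spec_merge_transcriptions
  exact merge_transcriptions_eq transcriptions segment_info
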